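-- pv_equiv track=rewrite | github.com/JRIngram/MaTris | agent.py | trim_tetromino
-- ===== SOURCE A (Python) =====
-- import copy, time, random, csv
--
-- def trim_tetromino(tetromino, rotation):
--     """
--     Removes empty rows and columns from a tetromino with a specific rotation
--     Returns both the number of left columns trimmed and the trimmed tetromino
--     The number of left columns trimmed is used in additional calculations as to where the tetromino should be placed.
--     """
--     trimmed_tetromino = copy.deepcopy(tetromino[rotation])
--     tetromino_matrix_height = len(trimmed_tetromino)
--
--     trimming_left = True
--     trimming_right = False
--     left_columns_trimmed = 0
--     right_columns_trimmed = 0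
--     columns_trimmed = 0
--     loop_without_trim = False
--
--     #Trim empty columns
--     while loop_without_trim == False:
--         """
--         Loops through rows within columns and lists cell values within each column.
--         If a column is "empty" i.e. full of 0s then the cell is removed and the loop process is restarted.
--         This continues until the tetromino is looped through without trimming
--         """
--         loop_without_trim = True
--         for x in range(len(trimmed_tetromino[0])):
--
--             column = []
--             for y in range(tetromino_matrix_height):
--                 column.append(trimmed_tetromino[y][x])
--             if 1 not in column:
--                 loop_without_trim = False
--                 columns_trimmed = columns_trimmed + 1
--                 if trimming_left == True:
--                     left_columns_trimmed = left_columns_trimmed + 1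
--                 else:
--                     right_columns_trimmed = right_columns_trimmed + 1
--                 for y in range(tetromino_matrix_height):
--                     trimmed_tetromino[y].pop(x)
--                 break
--             if 1 in column and trimming_left == True and trimming_right == False:
--                 trimming_left = False
--                 trimming_right = False
--
--     #Trim empty rows
--     loop_without_trim = False
--     while loop_without_trim == False:
--             """
--             Loops through cells within row and lists cell values within each row.
--             If a row is "empty" i.e. full of 0s then the cell is removed and the loop process is restarted.
--             This continues until the tetromino is looped through without trimming
--             """
--             loop_without_trim = True
--             for x in range(len(trimmed_tetromino)):
--                 row = []
--                 for y in range(len(trimmed_tetromino[0])):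
--                     row.append(trimmed_tetromino[x][y])
--                 if 1 not in row:
--                     loop_without_trim = False
--                     trimmed_tetromino.pop(x)
--                     break
--
--     return trimmed_tetromino, left_columns_trimmed
-- ===== SOURCE B (Python) =====
-- def trim_tetromino(tetromino, rotation):
--     """Single-pass rewrite: find columns containing a 1 once, keep those columns
--     and the rows containing a 1; left trim = index of first kept column."""
--     matrix = tetromino[rotation]
--     width = len(matrix[0])
--     keep = [x for x in range(width) if any(row[x] == 1 for row in matrix)]
--     left = keep[0] if keep else width
--     new_matrix = [[row[x] for x in keep] for row in matrix if 1 in row]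
--     return new_matrix, left
-- ===== Notes on version B (the rewrite author's own statement) =====
-- stated objective: simpler
-- what changed: Replaces A's two restart-on-trim while loops (rebuilding every column and popping cells until a full pass trims nothing) by one direct construction: compute the set of column indices containing a 1, take the first as the left-trim count (width if none), and build the result by filtering rows containing a 1 and projecting them to the kept columns.
-- outside the precondition, e.g. on trim_tetromino([[[1], [1, 5]]], 0): A returns ([[1], [1, 5]], 0), B returns ([[1], [1]], 0)
import Mathlib
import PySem

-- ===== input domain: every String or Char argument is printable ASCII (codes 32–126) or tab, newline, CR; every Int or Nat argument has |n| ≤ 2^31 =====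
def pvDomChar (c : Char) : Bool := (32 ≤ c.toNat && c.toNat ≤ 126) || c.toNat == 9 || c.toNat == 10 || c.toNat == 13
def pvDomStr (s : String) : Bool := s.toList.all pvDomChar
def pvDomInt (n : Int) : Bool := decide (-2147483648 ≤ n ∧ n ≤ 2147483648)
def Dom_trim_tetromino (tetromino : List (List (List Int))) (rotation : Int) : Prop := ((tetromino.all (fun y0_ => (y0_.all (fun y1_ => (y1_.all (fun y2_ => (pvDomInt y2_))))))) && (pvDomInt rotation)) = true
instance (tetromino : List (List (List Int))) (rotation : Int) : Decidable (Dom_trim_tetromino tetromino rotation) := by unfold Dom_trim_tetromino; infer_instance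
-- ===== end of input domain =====

-- ===== PORT A =====
-- B is a direct one-pass construction of the trimmed matrix; the proof is about the
-- return value only (A deep-copies, so neither version mutates its argument).

-- column x of m, built like A: [m[y][x] for y in range(h)]
def pvColAt (m : List (List Int)) (h x : Nat) : List Int :=
  (List.range h).map (fun y => (m.getD y []).getD x 0)

-- A's inner column for-loop: first empty column (with trimming_left at the break), or none
def pvFindCol (m : List (List Int)) (h : Nat) : List Nat → Bool → Option (Nat × Bool)
  | [], _ => none
  | x :: xs, tl =>
    if (pvColAt m h x).contains 1 then
      pvFindCol m h xs (if tl then false else tl)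
    else some (x, tl)

-- A's outer column while-loop (fuel = width + 1 suffices: each pass trims one column)
def pvColLoop : Nat → List (List Int) → Nat → Bool → Int → List (List Int) × Bool × Int
  | 0, m, _, tl, left => (m, tl, left)
  | Nat.succ fuel, m, h, tl, left =>
    match pvFindCol m h (List.range (m.headD []).length) tl with
    | none => (m, tl, left)
    | some (x, tl') =>
      pvColLoop fuel (m.map (fun row => row.eraseIdx x)) h tl' (if tl' then left + 1 else left)

-- row x of m, rebuilt like A: [m[x][y] for y in range(len(m[0]))]
def pvRowAt (m : List (List Int)) (x : Nat) : List Int :=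
  (List.range (m.headD []).length).map (fun y => (m.getD x []).getD y 0)

-- A's inner row for-loop: first row without a 1, or none
def pvFindRow (m : List (List Int)) : List Nat → Option Nat
  | [] => none
  | x :: xs => if (pvRowAt m x).contains 1 then pvFindRow m xs else some x

-- A's row while-loop (fuel = height + 1 suffices)
def pvRowLoop : Nat → List (List Int) → List (List Int)
  | 0, m => m
  | Nat.succ fuel, m =>
    match pvFindRow m (List.range m.length) with
    | none => m
    | some x => pvRowLoop fuel (m.eraseIdx x)

def trim_tetromino (tetromino : List (List (List Int))) (rotation : Int) : List (List Int) × Int :=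
  let m := (PySem.List.pyGet? tetromino rotation).getD []
  let h := m.length
  let res := pvColLoop ((m.headD []).length + 1) m h true 0
  let m2 := pvRowLoop (res.1.length + 1) res.1
  (m2, res.2.2)

-- ===== PORT B =====
def trim_tetromino_alt (tetromino : List (List (List Int))) (rotation : Int) : List (List Int) × Int :=
  let m := (PySem.List.pyGet? tetromino rotation).getD []
  let width := (m.headD []).length
  let keep := (List.range width).filter (fun x => m.any (fun row => row.getD x 0 == 1))
  let left : Int := match keep with | [] => (width : Int) | x :: _ => (x : Int)
  let newm := (m.filter (fun row => row.contains (1 : Int))).map (fun row => keep.map (fun x => row.getD x 0))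
  (newm, left)

-- ===== PRECONDITION & SPEC =====
-- Pre_ restricts to the function's natural domain — a valid rotation index and a nonempty
-- rectangular matrix: outside it A raises IndexError (rotation out of range, height 0, or a row
-- shorter than row 0), except for ragged matrices whose over-long rows A returns untrimmed.
def Pre_trim_tetromino (tetromino : List (List (List Int))) (rotation : Int) : Prop :=
  (PySem.List.pyGet? tetromino rotation).isSome ∧
  ((PySem.List.pyGet? tetromino rotation).getD []) ≠ [] ∧
  ∀ row ∈ (PySem.List.pyGet? tetromino rotation).getD [],
    row.length = (((PySem.List.pyGet? tetromino rotation).getD []).headD []).length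
instance (tetromino : List (List (List Int))) (rotation : Int) : Decidable (Pre_trim_tetromino tetromino rotation) := by unfold Pre_trim_tetromino; infer_instance

def pvWitness_trim_tetromino : List (List (List Int)) × Int := ([[[0, 1], [0, 1]]], 0)

def Spec_trim_tetromino (tetromino : List (List (List Int))) (rotation : Int) (out : List (List Int) × Int) : Prop := out = trim_tetromino_alt tetromino rotation
instance (tetromino : List (List (List Int))) (rotation : Int) (out : List (List Int) × Int) : Decidable (Spec_trim_tetromino tetromino rotation out) := by unfold Spec_trim_tetromino; infer_instance

-- ===== CLAIM (what is proved, stated in full; the proofs are below) =====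
def Claim_equal_trim_tetromino : Prop := ∀ (tetromino : List (List (List Int))) (rotation : Int), Dom_trim_tetromino tetromino rotation → Pre_trim_tetromino tetromino rotation → Spec_trim_tetromino tetromino rotation (trim_tetromino tetromino rotation)

-- ===== LEMMAS AND PROOFS =====

-- B-side abbreviations used throughout the proofs
def pvHas1 (m : List (List Int)) (x : Nat) : Bool := m.any (fun row => row.getD x 0 == 1)
def pvKeep (m : List (List Int)) (w : Nat) : List Nat := (List.range w).filter (pvHas1 m)
def pvLeft (m : List (List Int)) (w : Nat) : Int :=
  match pvKeep m w with | [] => (w : Int) | x :: _ => (x : Int)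

lemma pvLeft_nil (m : List (List Int)) (w : Nat) (h : pvKeep m w = []) :
    pvLeft m w = (w : Int) := by unfold pvLeft; rw [h]

lemma pvLeft_cons (m : List (List Int)) (w x : Nat) (xs : List Nat)
    (h : pvKeep m w = x :: xs) : pvLeft m w = (x : Int) := by unfold pvLeft; rw [h]

lemma range_map_getD {α β : Type} (l : List α) (d : α) (f : α → β) :
    (List.range l.length).map (fun y => f (l.getD y d)) = l.map f := by
  induction l with
  | nil => simp
  | cons a l ih =>
    simp only [List.length_cons, List.range_succ_eq_map, List.map_cons, List.map_map,
      Function.comp_def, List.getD_cons_zero, List.getD_cons_succ]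
    rw [ih]

lemma range_map_getD_id (l : List Int) :
    (List.range l.length).map (fun y => l.getD y 0) = l := by
  simpa using range_map_getD l 0 id

lemma headD_mem {α : Type} (m : List α) (d : α) (h : m ≠ []) : m.headD d ∈ m := by
  cases m with
  | nil => exact absurd rfl h
  | cons a l => simp

lemma mem_range'_one {s n x : Nat} (h : x ∈ List.range' s n) : s ≤ x ∧ x < s + n := by
  obtain ⟨i, hi, rfl⟩ := List.mem_range'.1 h
  omega

lemma colLoop_succ (fuel : Nat) (m : List (List Int)) (h : Nat) (tl : Bool) (left : Int) :
    pvColLoop (fuel + 1) m h tl left =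
      match pvFindCol m h (List.range (m.headD []).length) tl with
      | none => (m, tl, left)
      | some (x, tl') =>
        pvColLoop fuel (m.map (fun row => row.eraseIdx x)) h tl'
          (if tl' then left + 1 else left) := rfl

lemma rowLoop_succ (fuel : Nat) (m : List (List Int)) :
    pvRowLoop (fuel + 1) m =
      match pvFindRow m (List.range m.length) with
      | none => m
      | some x => pvRowLoop fuel (m.eraseIdx x) := rfl

lemma colAt_eq_map (m : List (List Int)) (x : Nat) :
    pvColAt m m.length x = m.map (fun row => row.getD x 0) := by
  simpa [pvColAt] using range_map_getD m [] (fun row => row.getD x 0)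

lemma colAt_contains (m : List (List Int)) (x : Nat) :
    (pvColAt m m.length x).contains 1 = pvHas1 m x := by
  rw [colAt_eq_map]
  rw [Bool.eq_iff_iff, List.contains_iff_mem]
  unfold pvHas1
  rw [List.any_eq_true]
  constructor
  · intro h1
    obtain ⟨row, hrow, heq⟩ := List.mem_map.1 h1
    exact ⟨row, hrow, by simpa using heq⟩
  · rintro ⟨row, hrow, hb⟩
    have hb' : row.getD x 0 = 1 := by simpa using hb
    exact List.mem_map.2 ⟨row, hrow, hb'⟩

-- find over a list with all columns nonempty
lemma findCol_none (m : List (List Int)) (h : Nat) (xs : List Nat) (tl : Bool)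
    (hall : ∀ x ∈ xs, (pvColAt m h x).contains 1 = true) :
    pvFindCol m h xs tl = none := by
  induction xs generalizing tl with
  | nil => rfl
  | cons x xs ih =>
    simp only [pvFindCol, hall x (by simp), if_pos]
    exact ih _ (fun y hy => hall y (by simp [hy]))

-- find over range' s n when the first failing index is x₀
lemma findCol_some (m : List (List Int)) (h : Nat) (x₀ : Nat) :
    ∀ (n s : Nat) (tl : Bool), s ≤ x₀ → x₀ < s + n →
    (pvColAt m h x₀).contains 1 = false →
    (∀ x, s ≤ x → x < x₀ → (pvColAt m h x).contains 1 = true) →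
    pvFindCol m h (List.range' s n) tl = some (x₀, tl && decide (x₀ = s)) := by
  intro n
  induction n with
  | zero => intro s tl h1 h2 h3 h4; omega
  | succ n ih =>
    intro s tl h1 h2 hx0 hmin
    rw [List.range'_succ]
    by_cases hs : x₀ = s
    · subst hs
      simp only [pvFindCol]
      rw [hx0]
      simp
    · have hslt : s < x₀ := by omega
      have hps : (pvColAt m h s).contains 1 = true := hmin s le_rfl hslt
      simp only [pvFindCol]
      rw [hps]
      simp only [if_pos]
      rw [ih (s + 1) (if tl then false else tl) (by omega) (by omega) hx0
        (fun x hx1 hx2 => hmin x (by omega) hx2)]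
      cases tl <;> simp [hs]

-- getD after erasing column x₀ (shift lemma)
lemma getD_eraseIdx (row : List Int) (w x₀ x : Nat)
    (hlen : row.length = w + 1) (hx₀ : x₀ < w + 1) (hx : x < w) :
    (row.eraseIdx x₀).getD x 0 = row.getD (if x < x₀ then x else x + 1) 0 := by
  by_cases hlt : x < x₀
  · rw [if_pos hlt]
    rw [List.getD_eq_getElem?_getD, List.getD_eq_getElem?_getD,
      List.getElem?_eraseIdx_of_lt hlt]
  · rw [if_neg hlt]
    rw [List.getD_eq_getElem?_getD, List.getD_eq_getElem?_getD,
      List.getElem?_eraseIdx_of_ge (by omega)]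

lemma has1_eraseIdx (m : List (List Int)) (w x₀ x : Nat)
    (hrect : ∀ row ∈ m, row.length = w + 1) (hx₀ : x₀ < w + 1) (hx : x < w) :
    pvHas1 (m.map (fun row => row.eraseIdx x₀)) x = pvHas1 m (if x < x₀ then x else x + 1) := by
  unfold pvHas1
  rw [List.any_map, Bool.eq_iff_iff, List.any_eq_true, List.any_eq_true]
  constructor
  · rintro ⟨row, hrow, hb⟩
    refine ⟨row, hrow, ?_⟩
    rwa [Function.comp_apply, getD_eraseIdx row w x₀ x (hrect row hrow) hx₀ hx] at hb
  · rintro ⟨row, hrow, hb⟩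
    refine ⟨row, hrow, ?_⟩
    rwa [Function.comp_apply, getD_eraseIdx row w x₀ x (hrect row hrow) hx₀ hx]

lemma range_split (a w : Nat) (h : a ≤ w) :
    List.range w = List.range' 0 a ++ List.range' a (w - a) := by
  have hr := @List.range'_append 0 a (w - a) 1
  simp only [Nat.one_mul, Nat.zero_add] at hr
  rw [List.range_eq_range']
  conv_lhs => rw [show w = a + (w - a) from by omega]
  exact hr.symm

-- (range w).map σ = range (w+1) with x₀ removed
lemma range_map_shift (w x₀ : Nat) (hx₀ : x₀ < w + 1) :
    (List.range w).map (fun x => if x < x₀ then x else x + 1) =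
      (List.range (w + 1)).filter (fun x => decide (x ≠ x₀)) := by
  rw [range_split x₀ w (by omega), range_split x₀ (w + 1) (by omega)]
  rw [List.map_append, List.filter_append]
  congr 1
  · rw [List.filter_eq_self.2 (by
      intro x hx
      have := mem_range'_one hx
      simp only [decide_eq_true_eq]
      omega)]
    rw [List.map_congr_left (g := id) (by
      intro x hx
      have := mem_range'_one hx
      simp only [id]
      rw [if_pos (by omega)])]
    exact List.map_id _
  · have hw : w + 1 - x₀ = (w - x₀) + 1 := by omega
    rw [hw, List.range'_succ, List.filter_cons_of_neg (by simp)]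
    rw [List.filter_eq_self.2 (by
      intro x hx
      have := mem_range'_one hx
      simp only [decide_eq_true_eq]
      omega)]
    rw [List.map_congr_left (g := fun x => 1 + x) (by
      intro x hx
      have := mem_range'_one hx
      rw [if_neg (by omega)]
      show x + 1 = 1 + x
      omega)]
    rw [List.map_add_range']
    congr 1
    omega

-- keep-set of the matrix with empty column x₀ erased
lemma keep_eraseIdx (m : List (List Int)) (w x₀ : Nat)
    (hrect : ∀ row ∈ m, row.length = w + 1) (hx₀ : x₀ < w + 1)
    (hempty : pvHas1 m x₀ = false) :
    pvKeep m (w + 1) = (pvKeep (m.map (fun row => row.eraseIdx x₀)) w).map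
      (fun x => if x < x₀ then x else x + 1) := by
  unfold pvKeep
  rw [List.filter_congr (l := List.range w)
    (q := pvHas1 m ∘ fun x => if x < x₀ then x else x + 1)
    (fun x hx => by
      show pvHas1 (List.map (fun row => row.eraseIdx x₀) m) x
          = pvHas1 m (if x < x₀ then x else x + 1)
      exact has1_eraseIdx m w x₀ x hrect hx₀ (List.mem_range.1 hx))]
  rw [← List.filter_map, range_map_shift w x₀ hx₀, List.filter_filter]
  exact List.filter_congr (fun x _ => by
    by_cases hxx : x = x₀
    · subst hxx; simp [hempty]
    · simp [hxx])

-- the A-side column loop computes B's keep-projection and left value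
lemma colLoop_spec : ∀ (w : Nat) (m : List (List Int)) (tl : Bool) (left : Int),
    m ≠ [] → (∀ row ∈ m, row.length = w) →
    ∃ tlf, pvColLoop (w + 1) m m.length tl left =
      (m.map (fun row => (pvKeep m w).map (fun x => row.getD x 0)), tlf,
        left + (if tl then pvLeft m w else 0)) := by
  intro w
  induction w with
  | zero =>
    intro m tl left hne hrect
    refine ⟨tl, ?_⟩
    have hhead : (m.headD []).length = 0 := hrect _ (headD_mem m [] hne)
    rw [colLoop_succ, hhead]
    show (m, tl, left) = _
    have hmap : m.map (fun row => (pvKeep m 0).map (fun x => row.getD x 0)) = m := by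
      rw [List.map_congr_left (g := id) (by
        intro row hrow
        have : row = [] := List.eq_nil_of_length_eq_zero (hrect row hrow)
        simp [this, pvKeep])]
      exact List.map_id _
    rw [hmap, pvLeft_nil m 0 (by simp [pvKeep])]
    cases tl <;> simp
  | succ w ih =>
    intro m tl left hne hrect
    have hhead : (m.headD []).length = w + 1 := hrect _ (headD_mem m [] hne)
    by_cases hex : ∃ x, x < w + 1 ∧ pvHas1 m x = false
    · -- there is an empty column; take the least such index x₀
      obtain ⟨x₀, hx₀lt, hx₀e, hmin⟩ :
          ∃ x₀, x₀ < w + 1 ∧ pvHas1 m x₀ = false ∧ ∀ x, x < x₀ → pvHas1 m x = true := by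
        obtain ⟨hlt, he⟩ := Nat.find_spec hex
        refine ⟨Nat.find hex, hlt, he, fun x hx => ?_⟩
        by_contra hc
        exact Nat.find_min hex hx ⟨by omega, by simpa using hc⟩
      have hfind : pvFindCol m m.length (List.range (w + 1)) tl =
          some (x₀, tl && decide (x₀ = 0)) := by
        rw [List.range_eq_range']
        exact findCol_some m m.length x₀ (w + 1) 0 tl (Nat.zero_le _) (by omega)
          (by rw [colAt_contains]; exact hx₀e)
          (fun x _ hx => by rw [colAt_contains]; exact hmin x hx)
      set m' := m.map (fun row => row.eraseIdx x₀) with hm'def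
      have hm'ne : m' ≠ [] := by simp [hm'def, hne]
      have hm'rect : ∀ row ∈ m', row.length = w := by
        intro row hrow
        obtain ⟨r, hr, rfl⟩ := List.mem_map.1 hrow
        rw [List.length_eraseIdx_of_lt (by rw [hrect r hr]; omega), hrect r hr]
        omega
      have hm'len : m.length = m'.length := by simp [hm'def]
      obtain ⟨tlf, hIH⟩ := ih m' (tl && decide (x₀ = 0))
        (if tl && decide (x₀ = 0) then left + 1 else left) hm'ne hm'rect
      refine ⟨tlf, ?_⟩
      rw [show w + 1 + 1 = (w + 1) + 1 from rfl, colLoop_succ, hhead, hfind]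
      show pvColLoop (w + 1) m' m.length (tl && decide (x₀ = 0))
          (if (tl && decide (x₀ = 0)) = true then left + 1 else left) = _
      rw [hm'len, hIH]
      -- matrix components agree
      have hmat : m'.map (fun row => (pvKeep m' w).map (fun x => row.getD x 0)) =
          m.map (fun row => (pvKeep m (w + 1)).map (fun x => row.getD x 0)) := by
        rw [hm'def, List.map_map]
        apply List.map_congr_left
        intro row hrow
        simp only [Function.comp_def]
        rw [keep_eraseIdx m w x₀ hrect hx₀lt hx₀e, List.map_map]
        apply List.map_congr_left
        intro x hx
        have hxw : x < w := List.mem_range.1 (List.mem_filter.1 hx).1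
        simp only [Function.comp_def]
        rw [getD_eraseIdx row w x₀ x (hrect row hrow) hx₀lt hxw]
      rw [hmat]
      -- left components agree
      have hleft : (if tl && decide (x₀ = 0) then left + 1 else left) +
          (if tl && decide (x₀ = 0) then pvLeft m' w else 0) =
          left + (if tl then pvLeft m (w + 1) else 0) := by
        by_cases hz : x₀ = 0
        · -- leading empty column: left value shifts by one
          subst hz
          have hkeep := keep_eraseIdx m w 0 hrect (by omega) hx₀e
          have hL : pvLeft m (w + 1) = pvLeft m' w + 1 := by
            cases h : pvKeep m' w with
            | nil =>
              rw [pvLeft_nil m' w h, pvLeft_nil m (w + 1) (by rw [hkeep, h]; rfl)]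
              push_cast; ring
            | cons y ys =>
              rw [pvLeft_cons m' w y ys h,
                pvLeft_cons m (w + 1) (y + 1) (ys.map (fun x => if x < 0 then x else x + 1))
                  (by rw [hkeep, h]; rfl)]
              push_cast; ring
          cases tl <;> simp [hL] <;> ring
        · -- a nonempty column precedes: trimming_left is already off, left value is 0
          have h0 : pvHas1 m 0 = true := hmin 0 (by omega)
          have hL : pvLeft m (w + 1) = 0 := by
            have hk : pvKeep m (w + 1) =
                0 :: ((List.range w).map Nat.succ).filter (pvHas1 m) := by
              unfold pvKeep
              rw [List.range_succ_eq_map, List.filter_cons_of_pos h0]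
            rw [pvLeft_cons m (w + 1) 0 _ hk]
            simp
          simp only [hz, decide_false, Bool.and_false]
          cases tl <;> simp [hL]
      rw [hleft]
    · -- no empty column: the loop stops, keep is everything
      have hall : ∀ x, x < w + 1 → pvHas1 m x = true := by
        intro x hx
        by_contra hc
        exact hex ⟨x, hx, by simpa using hc⟩
      refine ⟨tl, ?_⟩
      rw [colLoop_succ, hhead]
      rw [findCol_none m m.length _ tl
        (fun x hx => by rw [colAt_contains]; exact hall x (List.mem_range.1 hx))]
      show (m, tl, left) = _
      have hkeep : pvKeep m (w + 1) = List.range (w + 1) :=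
        List.filter_eq_self.2 (fun x hx => hall x (List.mem_range.1 hx))
      have hmat : m.map (fun row => (pvKeep m (w + 1)).map (fun x => row.getD x 0)) = m := by
        rw [hkeep]
        rw [List.map_congr_left (g := id) (by
          intro row hrow
          have hl : row.length = w + 1 := hrect row hrow
          simp only [id]
          rw [← hl, range_map_getD_id])]
        exact List.map_id _
      rw [hmat]
      have hL : pvLeft m (w + 1) = 0 := by
        have hk : pvKeep m (w + 1) = 0 :: (List.range w).map Nat.succ := by
          rw [hkeep, List.range_succ_eq_map]
        rw [pvLeft_cons m (w + 1) 0 _ hk]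
        simp
      cases tl <;> simp [hL]

-- row-phase lemmas
lemma findRow_none (m : List (List Int)) (xs : List Nat)
    (hall : ∀ x ∈ xs, (pvRowAt m x).contains 1 = true) :
    pvFindRow m xs = none := by
  induction xs with
  | nil => rfl
  | cons x xs ih =>
    simp only [pvFindRow, hall x (by simp), if_pos]
    exact ih (fun y hy => hall y (by simp [hy]))

lemma findRow_some (m : List (List Int)) (x₀ : Nat) :
    ∀ (n s : Nat), s ≤ x₀ → x₀ < s + n →
    (pvRowAt m x₀).contains 1 = false →
    (∀ x, s ≤ x → x < x₀ → (pvRowAt m x).contains 1 = true) →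
    pvFindRow m (List.range' s n) = some x₀ := by
  intro n
  induction n with
  | zero => intro s h1 h2 h3 h4; omega
  | succ n ih =>
    intro s h1 h2 hx0 hmin
    rw [List.range'_succ]
    by_cases hs : x₀ = s
    · subst hs
      simp only [pvFindRow]
      rw [hx0]
      simp
    · have hps := hmin s le_rfl (by omega)
      simp only [pvFindRow]
      rw [hps]
      simp only [if_pos]
      exact ih (s + 1) (by omega) (by omega) hx0 (fun x hx1 hx2 => hmin x (by omega) hx2)

-- under rectangularity the rebuilt row is the row itself
lemma rowAt_eq (m : List (List Int)) (x : Nat) (hx : x < m.length)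
    (hrect : ∀ r₁ ∈ m, ∀ r₂ ∈ m, r₁.length = r₂.length) :
    pvRowAt m x = m.getD x [] := by
  have hne : m ≠ [] := by intro h; subst h; simp at hx
  have hmem : m.getD x [] ∈ m := by
    rw [List.getD_eq_getElem _ _ hx]; exact List.getElem_mem hx
  have hlen : (m.headD []).length = (m.getD x []).length :=
    hrect _ (headD_mem m [] hne) _ hmem
  unfold pvRowAt
  rw [hlen, range_map_getD_id]

-- the A-side row loop filters out rows without a 1
lemma rowLoop_spec : ∀ (n : Nat) (m : List (List Int)), m.length = n →
    (∀ r₁ ∈ m, ∀ r₂ ∈ m, r₁.length = r₂.length) →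
    pvRowLoop (n + 1) m = m.filter (fun row => row.contains 1) := by
  intro n
  induction n with
  | zero =>
    intro m hlen _
    have : m = [] := List.eq_nil_of_length_eq_zero hlen
    subst this
    rfl
  | succ n ih =>
    intro m hlen hrect
    by_cases hex : ∃ x, x < m.length ∧ (m.getD x []).contains (1 : Int) = false
    · obtain ⟨x₀, hx₀lt, hx₀e, hmin⟩ :
          ∃ x₀, x₀ < m.length ∧ (m.getD x₀ []).contains (1 : Int) = false ∧
            ∀ x, x < x₀ → (m.getD x []).contains (1 : Int) = true := by
        obtain ⟨hlt, he⟩ := Nat.find_spec hex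
        refine ⟨Nat.find hex, hlt, he, fun x hx => ?_⟩
        by_contra hc
        exact Nat.find_min hex hx ⟨by omega, by simpa using hc⟩
      have hfind : pvFindRow m (List.range m.length) = some x₀ := by
        rw [List.range_eq_range']
        exact findRow_some m x₀ m.length 0 (Nat.zero_le _) (by omega)
          (by rw [rowAt_eq m x₀ hx₀lt hrect]; exact hx₀e)
          (fun x _ hx => by rw [rowAt_eq m x (by omega) hrect]; exact hmin x hx)
      have hstep : pvRowLoop (Nat.succ n + 1) m = pvRowLoop (n + 1) (m.eraseIdx x₀) := by
        rw [rowLoop_succ, hfind]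
      rw [hstep, ih (m.eraseIdx x₀)
        (by rw [List.length_eraseIdx_of_lt hx₀lt]; omega)
        (fun r₁ h₁ r₂ h₂ => hrect r₁ (List.mem_of_mem_eraseIdx h₁) r₂ (List.mem_of_mem_eraseIdx h₂))]
      -- filtering is unchanged by erasing a row without a 1
      rw [List.eraseIdx_eq_take_drop_succ, List.filter_append]
      conv_rhs => rw [← List.take_append_drop x₀ m]
      rw [List.filter_append]
      congr 1
      rw [← List.getElem_cons_drop hx₀lt, List.filter_cons_of_neg (by
        rw [List.getD_eq_getElem _ _ hx₀lt] at hx₀e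
        simp only [Bool.not_eq_true]
        exact hx₀e)]
    · have hall : ∀ x, x < m.length → (m.getD x []).contains (1 : Int) = true := by
        intro x hx
        by_contra hc
        exact hex ⟨x, hx, by simpa using hc⟩
      rw [rowLoop_succ, findRow_none m _
        (fun x hx => by
          have hxlt := List.mem_range.1 hx
          rw [rowAt_eq m x hxlt hrect]; exact hall x hxlt)]
      refine (List.filter_eq_self.2 ?_).symm
      intro row hrow
      obtain ⟨i, hi, rfl⟩ := List.mem_iff_getElem.1 hrow
      have := hall i hi
      rwa [List.getD_eq_getElem _ _ hi] at this

-- a row's keep-projection contains a 1 iff the row does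
lemma contains_proj (m : List (List Int)) (w : Nat)
    (hrect : ∀ row ∈ m, row.length = w) (row : List Int) (hrow : row ∈ m) :
    ((pvKeep m w).map (fun x => row.getD x 0)).contains (1 : Int) = row.contains 1 := by
  have hlen : row.length = w := hrect row hrow
  rw [Bool.eq_iff_iff, List.contains_iff_mem, List.contains_iff_mem]
  constructor
  · intro h1
    obtain ⟨x, hx, heq⟩ := List.mem_map.1 h1
    have hxw : x < w := List.mem_range.1 (List.mem_filter.1 hx).1
    rw [List.getD_eq_getElem _ _ (by omega)] at heq
    exact heq ▸ List.getElem_mem (by omega)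
  · intro h1
    obtain ⟨i, hi, hieq⟩ := List.mem_iff_getElem.1 h1
    refine List.mem_map.2 ⟨i, ?_, ?_⟩
    · refine List.mem_filter.2 ⟨List.mem_range.2 (by omega), ?_⟩
      refine List.any_eq_true.2 ⟨row, hrow, ?_⟩
      rw [List.getD_eq_getElem _ _ hi, hieq]
      simp
    · rw [List.getD_eq_getElem _ _ hi, hieq]

-- ===== VERDICT (by name: the statement is the Claim_ definition above) =====
theorem trim_tetromino_spec : Claim_equal_trim_tetromino := by
  intro tetromino rotation _hdom hpre
  obtain ⟨-, hne, hrect⟩ := hpre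
  unfold Spec_trim_tetromino
  set m := (PySem.List.pyGet? tetromino rotation).getD [] with hm
  set w := (m.headD []).length with hw
  set K := pvKeep m w with hK
  set g : List Int → List Int := fun row => K.map (fun x => row.getD x 0) with hg
  obtain ⟨tlf, hcol⟩ := colLoop_spec w m true 0 hne hrect
  have hrect1 : ∀ r₁ ∈ m.map g, ∀ r₂ ∈ m.map g, r₁.length = r₂.length := by
    intro r₁ h₁ r₂ h₂
    obtain ⟨a, _, rfl⟩ := List.mem_map.1 h₁
    obtain ⟨b, _, rfl⟩ := List.mem_map.1 h₂
    simp [hg]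
  have hrow := rowLoop_spec (m.map g).length (m.map g) rfl hrect1
  have hmatrix : (m.map g).filter (fun row => row.contains 1) =
      (m.filter (fun row => row.contains (1 : Int))).map g := by
    rw [List.filter_map]
    congr 1
    exact List.filter_congr (fun row hrow => by
      show (g row).contains (1 : Int) = row.contains 1
      rw [hg]
      exact contains_proj m w hrect row hrow)
  show (pvRowLoop ((pvColLoop (w + 1) m m.length true 0).1.length + 1)
      (pvColLoop (w + 1) m m.length true 0).1,
    (pvColLoop (w + 1) m m.length true 0).2.2) =
    ((m.filter (fun row => row.contains (1 : Int))).map g, pvLeft m w)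
  rw [hcol]
  show (pvRowLoop ((m.map g).length + 1) (m.map g),
    (0 : Int) + if true then pvLeft m w else 0) = _
  rw [hrow, hmatrix]
  simp
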